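-- pv_equiv track=rewrite | github.com/candyer/codechef | ORTHODOX/ORTHODOX.py | solve
-- ===== SOURCE A (Python) =====
-- def solve(n, arr):
-- 	if n > 62: return 'NO'
-- 	res = set()
-- 	for l in range(n):
-- 		tmp = arr[l]
-- 		if tmp in res:
-- 			return 'NO'
-- 		res.add(tmp)
-- 		for r in range(l + 1, n):
-- 			tmp |= arr[r]
-- 			if tmp in res:
-- 				return 'NO'
-- 			res.add(tmp)
-- 	return 'YES'
-- ===== SOURCE B (Python) =====
-- def solve(n, arr):
--     if n > 62:
--         return 'NO'
--     ors = []      # OR of every subarray arr[l..r] with 0 <= l <= r < n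
--     ending = []   # ORs of subarrays ending at the current index, shortest-l first
--     for r in range(n):
--         ending = [x | arr[r] for x in ending] + [arr[r]]
--         ors += ending
--     return 'YES' if len(set(ors)) == len(ors) else 'NO'
-- ===== Notes on version B (the rewrite author's own statement) =====
-- stated objective: alternative
-- what changed: A scans subarrays by left endpoint with an incremental membership test and early exit; B makes a single left-to-right pass maintaining the list of ORs of subarrays ending at the current index (the classic rolling-OR decomposition), collects all OR values, and decides by comparing the count of values with the size of their set at the end.
-- outside the precondition, e.g. on solve(5, [1, 1]): A returns 'NO', B raises IndexError
import Mathlib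
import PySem

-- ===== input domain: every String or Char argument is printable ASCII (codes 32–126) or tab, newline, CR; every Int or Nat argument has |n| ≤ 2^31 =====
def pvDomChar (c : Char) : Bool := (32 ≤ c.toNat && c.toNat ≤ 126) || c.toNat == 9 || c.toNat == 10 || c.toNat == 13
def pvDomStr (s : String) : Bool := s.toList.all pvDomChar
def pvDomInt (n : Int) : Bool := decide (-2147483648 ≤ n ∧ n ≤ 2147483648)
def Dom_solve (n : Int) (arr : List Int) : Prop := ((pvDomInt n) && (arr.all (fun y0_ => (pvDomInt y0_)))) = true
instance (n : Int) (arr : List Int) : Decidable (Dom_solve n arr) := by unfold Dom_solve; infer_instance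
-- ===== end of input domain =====

-- B replaces A's left-endpoint scan with early-exit duplicate detection by a single left-to-right
-- pass over right endpoints maintaining the rolling list of subarray ORs, deciding at the end by
-- count-versus-distinct-count (objective: alternative decomposition, same asymptotic cost).

-- ===== PORT A =====
-- inner 'for r in range(l + 1, n)' loop; 'none' = the early 'return "NO"'
def solveAInner (arr : List Int) : List Int → Int → PySem.Set Int → Option (PySem.Set Int)
  | [], _, res => some res
  | r :: rs, tmp, res =>
    let tmp' := PySem.Int.bor tmp (PySem.List.pyGetD arr r 0)
    if PySem.Set.contains res tmp' then none
    else solveAInner arr rs tmp' (PySem.Set.add res tmp')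

-- outer 'for l in range(n)' loop
def solveAOuter (arr : List Int) (n : Int) : List Int → PySem.Set Int → Option (PySem.Set Int)
  | [], res => some res
  | l :: ls, res =>
    let tmp := PySem.List.pyGetD arr l 0   -- arr[l]; Pre_solve keeps every touched index in range
    if PySem.Set.contains res tmp then none
    else
      match solveAInner arr (PySem.List.pyRange (l + 1) n 1) tmp (PySem.Set.add res tmp) with
      | none => none
      | some res' => solveAOuter arr n ls res'

def solve (n : Int) (arr : List Int) : String :=
  if n > 62 then "NO"
  else
    match solveAOuter arr n (PySem.List.pyRange 0 n 1) PySem.Set.empty with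
    | none => "NO"
    | some _ => "YES"

-- ===== PORT B =====
def solve_alt (n : Int) (arr : List Int) : String :=
  if n > 62 then "NO"
  else
    let st := (PySem.List.pyRange 0 n 1).foldl
      (fun (st : List Int × List Int) r =>
        let a := PySem.List.pyGetD arr r 0
        let ending := st.2.map (fun x => PySem.Int.bor x a) ++ [a]
        (st.1 ++ ending, ending)) ([], [])
    if PySem.Set.len (PySem.Set.ofList st.1) == PySem.List.len st.1 then "YES" else "NO"

-- ===== PRECONDITION & SPEC =====
-- Pre_solve excludes the inputs with n ≤ 62 and n > len(arr): there the Pythons index past the end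
-- of arr — A usually raises IndexError (though it may happen to return 'NO' early when a duplicate
-- OR value appears before the first bad access) and B raises IndexError.
def Pre_solve (n : Int) (arr : List Int) : Prop := 62 < n ∨ n ≤ PySem.List.len arr
instance (n : Int) (arr : List Int) : Decidable (Pre_solve n arr) := by unfold Pre_solve; infer_instance
def pvWitness_solve : Int × List Int := (3, [1, 2, 4])

def Spec_solve (n : Int) (arr : List Int) (out : String) : Prop := out = solve_alt n arr
instance (n : Int) (arr : List Int) (out : String) : Decidable (Spec_solve n arr out) := by unfold Spec_solve; infer_instance

-- ===== CLAIM (what is proved, stated in full; the proofs are below) =====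
def Claim_equal_solve : Prop := ∀ (n : Int) (arr : List Int), Dom_solve n arr → Pre_solve n arr → Spec_solve n arr (solve n arr)

-- ===== LEMMAS AND PROOFS =====

-- arr[i] for a Nat index i
def fN (arr : List Int) (i : Nat) : Int := PySem.List.pyGetD arr (i : Int) 0

-- OR of arr[l..l+k]
def or2 (arr : List Int) (l : Nat) : Nat → Int
  | 0 => fN arr l
  | k + 1 => PySem.Int.bor (or2 arr l k) (fN arr (l + k + 1))

-- all subarray ORs in A's order (by left endpoint)
def listA (arr : List Int) (m : Nat) : List Int :=
  (List.range m).flatMap (fun l => (List.range (m - l)).map (fun k => or2 arr l k))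

-- all subarray ORs in B's order (by right endpoint)
def listB (arr : List Int) (m : Nat) : List Int :=
  (List.range m).flatMap (fun r => (List.range (r + 1)).map (fun l => or2 arr l (r - l)))

-- B's rolling list after m steps
def endingL (arr : List Int) (m : Nat) : List Int :=
  (List.range m).map (fun l => or2 arr l (m - 1 - l))

-- the stream of tmp values A's inner loop checks
def innerVals (arr : List Int) : Int → List Int → List Int
  | _, [] => []
  | tmp, r :: rs =>
    let t := PySem.Int.bor tmp (PySem.List.pyGetD arr r 0)
    t :: innerVals arr t rs

-- generic membership-check-then-add scan
def scanDup : PySem.Set Int → List Int → Option (PySem.Set Int)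
  | res, [] => some res
  | res, x :: xs => if PySem.Set.contains res x then none else scanDup (PySem.Set.add res x) xs

theorem scanDup_append (res : PySem.Set Int) (xs ys : List Int) :
    scanDup res (xs ++ ys) = (scanDup res xs).bind (fun r => scanDup r ys) := by
  induction xs generalizing res with
  | nil => simp [scanDup]
  | cons x xs ih =>
    simp only [List.cons_append, scanDup]
    split <;> simp [ih]

theorem solveAInner_eq (arr : List Int) (rs : List Int) (tmp : Int) (res : PySem.Set Int) :
    solveAInner arr rs tmp res = scanDup res (innerVals arr tmp rs) := by
  induction rs generalizing tmp res with
  | nil => simp [solveAInner, innerVals, scanDup]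
  | cons r rs ih =>
    simp only [solveAInner, innerVals, scanDup]
    split <;> simp [ih]

theorem solveAOuter_eq (arr : List Int) (n : Int) (ls : List Int) (res : PySem.Set Int) :
    solveAOuter arr n ls res =
      scanDup res (ls.flatMap (fun l =>
        PySem.List.pyGetD arr l 0 ::
          innerVals arr (PySem.List.pyGetD arr l 0) (PySem.List.pyRange (l + 1) n 1))) := by
  induction ls generalizing res with
  | nil => simp [solveAOuter, scanDup]
  | cons l ls ih =>
    simp only [solveAOuter, List.flatMap_cons, scanDup_append, scanDup, solveAInner_eq]
    split
    · rfl
    · cases h : scanDup (PySem.Set.add res (PySem.List.pyGetD arr l 0))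
        (innerVals arr (PySem.List.pyGetD arr l 0) (PySem.List.pyRange (l + 1) n 1)) with
      | none => simp
      | some res' => simp [ih]

theorem scanDup_isSome (res : PySem.Set Int) (xs : List Int) :
    (scanDup res xs).isSome = true ↔ xs.Nodup ∧ ∀ x ∈ xs, x ∉ res := by
  induction xs generalizing res with
  | nil => simp [scanDup]
  | cons x xs ih =>
    simp only [scanDup]
    by_cases hx : PySem.Set.contains res x
    · rw [PySem.Set.contains_iff] at hx
      simp [hx]
    · rw [if_neg (by simpa using hx)]
      rw [PySem.Set.contains_iff] at hx
      rw [ih]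
      simp only [PySem.Set.mem_add, List.nodup_cons, List.mem_cons]
      constructor
      · rintro ⟨hnd, hall⟩
        refine ⟨⟨fun hxx => (hall x hxx) (Or.inr rfl), hnd⟩,
          fun y hy => hy.elim (fun h => h ▸ hx) (fun hymem h => (hall y hymem) (Or.inl h))⟩
      · rintro ⟨⟨hxx, hnd⟩, hall⟩
        exact ⟨hnd, fun y hy h => h.elim (fun h' => hall y (Or.inr hy) h')
          (fun h' => hxx (h' ▸ hy))⟩

theorem innerVals_spec (arr : List Int) (n : Int) :
    ∀ (t k l : Nat), (l + k + 1) + t = n.toNat →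
      innerVals arr (or2 arr l k) (PySem.List.pyRange ((l + k + 1 : Nat) : Int) n 1) =
        (List.range t).map (fun j => or2 arr l (k + 1 + j)) := by
  intro t
  induction t with
  | zero =>
    intro k l hh
    rw [PySem.List.pyRange_one_eq_nil (by omega)]
    simp [innerVals]
  | succ t ih =>
    intro k l hh
    rw [PySem.List.pyRange_one_cons (by omega)]
    simp only [innerVals]
    have harg : PySem.Int.bor (or2 arr l k) (PySem.List.pyGetD arr ((l + k + 1 : Nat) : Int) 0)
        = or2 arr l (k + 1) := rfl
    rw [harg]
    have hnext : ((l + k + 1 : Nat) : Int) + 1 = ((l + (k + 1) + 1 : Nat) : Int) := by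
      push_cast; ring
    rw [hnext, ih (k + 1) l (by omega), List.range_succ_eq_map, List.map_cons, List.map_map]
    refine congrArg₂ _ rfl ?_
    apply List.map_congr_left
    intro j _
    simp only [Function.comp]
    congr 1
    omega

theorem streamA_eq (arr : List Int) (n : Int) :
    ((PySem.List.pyRange 0 n 1).flatMap (fun l =>
        PySem.List.pyGetD arr l 0 ::
          innerVals arr (PySem.List.pyGetD arr l 0) (PySem.List.pyRange (l + 1) n 1))) =
      listA arr n.toNat := by
  have hrange : PySem.List.pyRange 0 n 1 = (List.range n.toNat).map (fun (k : Nat) => (k : Int)) := by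
    rw [PySem.List.pyRange_one]
    simp only [Int.sub_zero]
    apply List.map_congr_left
    intro k _
    omega
  rw [hrange, List.flatMap_map, listA]
  apply List.flatMap_congr
  intro l hl
  rw [List.mem_range] at hl
  have h1 : ((l : Int) + 1) = ((l + 0 + 1 : Nat) : Int) := by push_cast; ring
  have h2 : PySem.List.pyGetD arr (l : Int) 0 = or2 arr l 0 := rfl
  rw [h1, h2, innerVals_spec arr n (n.toNat - (l + 1)) 0 l (by omega)]
  have h3 : n.toNat - l = (n.toNat - (l + 1)) + 1 := by omega
  rw [h3, List.range_succ_eq_map, List.map_cons, List.map_map]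
  refine congrArg₂ _ rfl ?_
  apply List.map_congr_left
  intro j _
  simp only [Function.comp]
  congr 1
  omega

theorem flatMap_snoc_perm {α β : Type} (L : List α) (g : α → List β) (h : α → β) :
    (L.flatMap (fun x => g x ++ [h x])).Perm (L.flatMap g ++ L.map h) := by
  induction L with
  | nil => simp
  | cons x L ih =>
    simp only [List.flatMap_cons, List.map_cons]
    have h1 : ((g x ++ [h x]) ++ L.flatMap (fun y => g y ++ [h y])).Perm
        ((g x ++ [h x]) ++ (L.flatMap g ++ L.map h)) := ih.append_left _
    refine h1.trans ?_
    have h2 : (g x ++ [h x]) ++ (L.flatMap g ++ L.map h)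
        = g x ++ (h x :: (L.flatMap g ++ L.map h)) := by simp
    have h3 : (g x ++ L.flatMap g) ++ h x :: L.map h
        = g x ++ (L.flatMap g ++ h x :: L.map h) := by simp
    rw [h2, h3]
    exact (List.perm_middle.symm).append_left (g x)

theorem listA_perm_listB (arr : List Int) (m : Nat) : (listA arr m).Perm (listB arr m) := by
  induction m with
  | zero => simp [listA, listB]
  | succ m ih =>
    have hB : listB arr (m + 1) = listB arr m ++ (List.range (m + 1)).map (fun l => or2 arr l (m - l)) := by
      simp only [listB]
      rw [List.range_succ, List.flatMap_append]
      simp only [List.flatMap_cons, List.flatMap_nil, List.append_nil]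
      rw [List.range_succ]
    have hA1 : listA arr (m + 1)
        = (List.range m).flatMap (fun l => (List.range (m - l)).map (fun k => or2 arr l k)
            ++ [or2 arr l (m - l)]) ++ [or2 arr m 0] := by
      rw [listA, List.range_succ, List.flatMap_append]
      refine congrArg₂ _ ?_ (by simp)
      apply List.flatMap_congr
      intro l hl
      rw [List.mem_range] at hl
      have : m + 1 - l = (m - l) + 1 := by omega
      rw [this, List.range_succ, List.map_append]
      simp
    rw [hB, hA1]
    refine ((flatMap_snoc_perm _ _ _).append_right _).trans ?_
    have hsplit : (List.range (m + 1)).map (fun l => or2 arr l (m - l))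
        = (List.range m).map (fun l => or2 arr l (m - l)) ++ [or2 arr m 0] := by
      rw [List.range_succ, List.map_append]
      simp only [List.map_cons, List.map_nil, Nat.sub_self]
    rw [hsplit, ← listA, List.append_assoc]
    exact ih.append_right _

theorem foldB_spec (arr : List Int) (m : Nat) :
    ((List.range m).foldl
      (fun (st : List Int × List Int) (r : Nat) =>
        let a := fN arr r
        let ending := st.2.map (fun x => PySem.Int.bor x a) ++ [a]
        (st.1 ++ ending, ending)) ([], [])) = (listB arr m, endingL arr m) := by
  induction m with
  | zero => simp [listB, endingL]
  | succ m ih =>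
    rw [List.range_succ, List.foldl_append, ih, List.foldl_cons, List.foldl_nil]
    have hend : (endingL arr m).map (fun x => PySem.Int.bor x (fN arr m)) ++ [fN arr m]
        = endingL arr (m + 1) := by
      rw [endingL, endingL, List.map_map, List.range_succ, List.map_append]
      refine congrArg₂ _ ?_ (by simp [or2])
      apply List.map_congr_left
      intro l hl
      rw [List.mem_range] at hl
      simp only [Function.comp]
      have h1 : m - 1 - l + 1 = m + 1 - 1 - l := by omega
      have h2 : or2 arr l (m - 1 - l + 1)
          = PySem.Int.bor (or2 arr l (m - 1 - l)) (fN arr (l + (m - 1 - l) + 1)) := rfl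
      have h3 : l + (m - 1 - l) + 1 = m := by omega
      rw [← h1, h2, h3]
    have hors : listB arr (m + 1) = listB arr m ++ endingL arr (m + 1) := by
      simp only [listB, endingL]
      rw [List.range_succ, List.flatMap_append]
      simp only [List.flatMap_cons, List.flatMap_nil, List.append_nil, Nat.add_sub_cancel]
      rw [List.range_succ]
    dsimp only
    rw [hend, ← hors]

theorem foldl_add_len_le (xs : List Int) : ∀ (s : PySem.Set Int),
    (xs.foldl PySem.Set.add s).length ≤ s.length + xs.length := by
  induction xs with
  | nil => simp
  | cons x xs ih =>
    intro s
    rw [List.foldl_cons]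
    refine (ih _).trans ?_
    have : (PySem.Set.add s x).length ≤ s.length + 1 := by
      simp only [PySem.Set.add]
      split <;> simp
    simp only [List.length_cons]
    omega

theorem foldl_add_len_lt (xs : List Int) : ∀ (s : PySem.Set Int),
    (¬ xs.Nodup ∨ ∃ x ∈ xs, x ∈ s) →
    (xs.foldl PySem.Set.add s).length < s.length + xs.length := by
  induction xs with
  | nil => rintro s (h | ⟨x, hx, _⟩) <;> simp_all
  | cons x xs ih =>
    rintro s h
    rw [List.foldl_cons]
    by_cases hx : x ∈ s
    · have hadd : PySem.Set.add s x = s := by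
        simp [PySem.Set.add, hx]
      rw [hadd]
      have := foldl_add_len_le xs s
      simp only [List.length_cons]
      omega
    · have hadd : PySem.Set.add s x = s ++ [x] := by
        simp only [PySem.Set.add]
        rw [if_neg (by simpa [PySem.Set.contains_iff] using hx)]
      rw [hadd]
      have hcase : ¬ xs.Nodup ∨ ∃ y ∈ xs, y ∈ s ++ [x] := by
        rcases h with h | ⟨y, hy, hys⟩
        · rw [List.nodup_cons, not_and_or, not_not] at h
          rcases h with h | h
          · exact Or.inr ⟨x, h, by simp⟩
          · exact Or.inl h
        · rcases List.mem_cons.1 hy with rfl | hy'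
          · exact absurd hys hx
          · exact Or.inr ⟨y, hy', by simp [hys]⟩
      have := ih (s ++ [x]) hcase
      simp only [List.length_append, List.length_cons, List.length_nil] at this ⊢
      omega

theorem foldl_add_nodup_eq (xs : List Int) : ∀ (s : PySem.Set Int),
    xs.Nodup → (∀ x ∈ xs, x ∉ s) → xs.foldl PySem.Set.add s = s ++ xs := by
  induction xs with
  | nil => simp
  | cons x xs ih =>
    intro s hnd hdisj
    rw [List.nodup_cons] at hnd
    rw [List.foldl_cons]
    have hadd : PySem.Set.add s x = s ++ [x] := by
      simp only [PySem.Set.add]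
      rw [if_neg (by simpa [PySem.Set.contains_iff] using hdisj x (by simp))]
    rw [hadd, ih (s ++ [x]) hnd.2]
    · simp
    · intro y hy
      simp only [List.mem_append, List.mem_singleton]
      rintro (hys | rfl)
      · exact hdisj y (by simp [hy]) hys
      · exact hnd.1 hy

theorem ofList_len_eq_iff (xs : List Int) :
    (PySem.Set.ofList xs).length = xs.length ↔ xs.Nodup := by
  have hof : PySem.Set.ofList xs = xs.foldl PySem.Set.add [] := rfl
  constructor
  · intro hlen
    by_contra hnd
    have := foldl_add_len_lt xs [] (Or.inl hnd)
    rw [← hof] at this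
    simp at this
    omega
  · intro hnd
    rw [hof, foldl_add_nodup_eq xs [] hnd (by simp)]
    simp

theorem foldB_spec' (arr : List Int) (m : Nat) :
    (((List.range m).map (fun (k : Nat) => (k : Int))).foldl
      (fun (st : List Int × List Int) (r : Int) =>
        let a := PySem.List.pyGetD arr r 0
        let ending := st.2.map (fun x => PySem.Int.bor x a) ++ [a]
        (st.1 ++ ending, ending)) ([], [])) = (listB arr m, endingL arr m) := by
  rw [List.foldl_map]
  exact foldB_spec arr m

theorem pyRange_zero_eq (n : Int) :
    PySem.List.pyRange 0 n 1 = (List.range n.toNat).map (fun (k : Nat) => (k : Int)) := by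
  rw [PySem.List.pyRange_one]
  simp only [Int.sub_zero]
  apply List.map_congr_left
  intro k _
  omega

theorem solve_eq_if (n : Int) (arr : List Int) (h62 : ¬ n > 62) :
    solve n arr = if (listA arr n.toNat).Nodup then "YES" else "NO" := by
  unfold solve
  rw [if_neg h62, solveAOuter_eq, streamA_eq]
  have hempty : ∀ x ∈ listA arr n.toNat, x ∉ (PySem.Set.empty : PySem.Set Int) := by
    intro x _ hmem
    simp [PySem.Set.empty] at hmem
  cases h : scanDup PySem.Set.empty (listA arr n.toNat) with
  | none =>
    have hnd : ¬ (listA arr n.toNat).Nodup := by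
      intro hnd
      have hsome := (scanDup_isSome PySem.Set.empty (listA arr n.toNat)).2 ⟨hnd, hempty⟩
      rw [h] at hsome
      simp at hsome
    rw [if_neg hnd]
  | some r =>
    have hsome : (scanDup PySem.Set.empty (listA arr n.toNat)).isSome = true := by
      rw [h]
      rfl
    have hnd := ((scanDup_isSome PySem.Set.empty (listA arr n.toNat)).1 hsome).1
    rw [if_pos hnd]

theorem solve_alt_eq_if (n : Int) (arr : List Int) (h62 : ¬ n > 62) :
    solve_alt n arr = if (listB arr n.toNat).Nodup then "YES" else "NO" := by
  unfold solve_alt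
  rw [if_neg h62, pyRange_zero_eq, foldB_spec']
  by_cases hnd : (listB arr n.toNat).Nodup
  · have hlen : (PySem.Set.ofList (listB arr n.toNat)).length = (listB arr n.toNat).length :=
      (ofList_len_eq_iff _).2 hnd
    simp [PySem.Set.len, hlen, hnd]
  · have hlen : (PySem.Set.ofList (listB arr n.toNat)).length ≠ (listB arr n.toNat).length :=
      fun h => hnd ((ofList_len_eq_iff _).1 h)
    simp [PySem.Set.len, hnd, hlen]

-- ===== VERDICT (by name: the statement is the Claim_ definition above) =====
theorem solve_spec : Claim_equal_solve := by
  intro n arr _ _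
  unfold Spec_solve
  by_cases h62 : n > 62
  · unfold solve solve_alt
    rw [if_pos h62, if_pos h62]
  · rw [solve_eq_if n arr h62, solve_alt_eq_if n arr h62]
    simp only [(listA_perm_listB arr n.toNat).nodup_iff]
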